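-- pv_equiv track=rewrite | github.com/Comma0103/o1_inference_scaling_laws | o1_mmlu_pro.py | filter_mmlu_pro
-- ===== SOURCE A (Python) =====
-- def filter_mmlu_pro(dataset: list[dict], num_problem_per_category: int = 10) -> tuple[list[dict], list[str]]:
--     """
--     Filter the dataset to only include the first num_problem_per_category problems from each category.
--
--     Args:
--         dataset (list[dict]): The dataset of problems.
--         num_problem_per_category (int, optional): The number of problems to include per category. Defaults to 10.
--
--     Returns:
--         list[dict]: The filtered dataset.
--         list[str]: The list of categories.
--     """
--     filtered_dataset = []
--     category_counts = {}
--     for example in dataset: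
--         category = example["category"]
--         if category not in category_counts:
--             category_counts[category] = 0
--         if category_counts[category] < num_problem_per_category:
--             filtered_dataset.append(example)
--             category_counts[category] += 1
--     return filtered_dataset, list(category_counts.keys())
-- ===== SOURCE B (Python) =====
-- def filter_mmlu_pro(dataset, num_problem_per_category=10):
--     # Group the original indices by category (first-appearance order), then keep,
--     # per category, the first max(N, 0) indices and rebuild the dataset in order.
--     groups = {}
--     for i, example in enumerate(dataset):
--         groups.setdefault(example["category"], []).append(i)
--     n = max(num_problem_per_category, 0)
--     keep = {i for idxs in groups.values() for i in idxs[:n]}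
--     filtered = [example for i, example in enumerate(dataset) if i in keep]
--     return filtered, list(groups)
-- ===== Notes on version B (the rewrite author's own statement) =====
-- stated objective: alternative
-- what changed: Instead of streaming with a per-category running counter, B groups the original indices by category in one pass, keeps the first max(N,0) indices of each group via a slice, and rebuilds the filtered dataset by index membership; categories come from the group keys.
import Mathlib
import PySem

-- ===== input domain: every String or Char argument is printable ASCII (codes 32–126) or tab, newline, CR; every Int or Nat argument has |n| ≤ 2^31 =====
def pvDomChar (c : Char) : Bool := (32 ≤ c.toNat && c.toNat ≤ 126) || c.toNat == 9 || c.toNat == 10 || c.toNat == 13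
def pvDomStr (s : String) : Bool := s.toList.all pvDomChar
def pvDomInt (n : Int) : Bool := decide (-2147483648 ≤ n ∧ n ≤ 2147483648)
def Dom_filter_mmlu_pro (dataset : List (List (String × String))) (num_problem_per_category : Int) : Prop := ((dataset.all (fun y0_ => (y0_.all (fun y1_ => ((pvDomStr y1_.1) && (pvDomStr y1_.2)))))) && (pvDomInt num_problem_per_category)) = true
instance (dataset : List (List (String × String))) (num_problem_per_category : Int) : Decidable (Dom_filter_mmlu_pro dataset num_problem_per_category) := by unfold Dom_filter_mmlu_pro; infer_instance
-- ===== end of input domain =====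

-- B replaces A's streaming per-category counter by a group-indices-then-slice pass; equal value, no speed claim.

-- ===== PORT A =====
-- example["category"] (dict lookup, first-match on the association list; none = KeyError, excluded by Pre_)
def catOf? (ex : List (String × String)) : Option String :=
  (PySem.Dict.mk ex).get? "category"

-- A's loop body: state = (filtered_dataset, category_counts)
def aStep (n : Int) (st : List (List (String × String)) × PySem.Dict String Int)
    (ex : List (String × String)) : List (List (String × String)) × PySem.Dict String Int :=
  match catOf? ex with
  | none => st  -- Python raises KeyError here; such inputs are outside Pre_
  | some category =>
    let counts := if st.2.contains category then st.2 else st.2.insert category 0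
    if counts.getD category 0 < n then
      (st.1 ++ [ex], counts.insert category (counts.getD category 0 + 1))
    else
      (st.1, counts)

def filter_mmlu_pro (dataset : List (List (String × String))) (num_problem_per_category : Int) : (List (List (String × String))) × List String :=
  let st := dataset.foldl (aStep num_problem_per_category) ([], PySem.Dict.empty)
  (st.1, st.2.keys)

-- ===== PORT B =====
-- groups: category -> list of original indices (insertion order; setdefault+append = modify with [] default)
def altGroups (dataset : List (List (String × String))) : PySem.Dict String (List Int) :=
  (PySem.List.enumerate dataset 0).foldl
    (fun g p =>
      match catOf? p.2 with
      | none => g  -- Python raises KeyError here; such inputs are outside Pre_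
      | some c => g.modify c ([] : List Int) (· ++ [p.1]))
    PySem.Dict.empty

-- keep = {i for idxs in groups.values() for i in idxs[:max(n,0)]}
def altKeep (dataset : List (List (String × String))) (n : Int) : PySem.Set Int :=
  PySem.Set.ofList ((altGroups dataset).values.flatMap
    (fun idxs => PySem.List.slice idxs none (some (max n 0))))

def filter_mmlu_pro_alt (dataset : List (List (String × String))) (num_problem_per_category : Int) : (List (List (String × String))) × List String :=
  (((PySem.List.enumerate dataset 0).filter
      (fun p => PySem.Set.contains (altKeep dataset num_problem_per_category) p.1)).map (·.2),
   (altGroups dataset).keys)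

-- ===== PRECONDITION & SPEC =====
-- Pre_ excludes exactly the datasets in which some example lacks the "category" key: there Python A raises KeyError.
def Pre_filter_mmlu_pro (dataset : List (List (String × String))) (num_problem_per_category : Int) : Prop :=
  ∀ ex ∈ dataset, (catOf? ex).isSome
instance (dataset : List (List (String × String))) (num_problem_per_category : Int) : Decidable (Pre_filter_mmlu_pro dataset num_problem_per_category) := by unfold Pre_filter_mmlu_pro; infer_instance

def pvWitness_filter_mmlu_pro : (List (List (String × String))) × Int :=
  ([[("category", "math"), ("q", "1")], [("category", "law"), ("q", "2")], [("category", "math"), ("q", "3")]], 1)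

def Spec_filter_mmlu_pro (dataset : List (List (String × String))) (num_problem_per_category : Int) (out : (List (List (String × String))) × List String) : Prop := out = filter_mmlu_pro_alt dataset num_problem_per_category
instance (dataset : List (List (String × String))) (num_problem_per_category : Int) (out : (List (List (String × String))) × List String) : Decidable (Spec_filter_mmlu_pro dataset num_problem_per_category out) := by unfold Spec_filter_mmlu_pro; infer_instance

-- ===== CLAIM (what is proved, stated in full; the proofs are below) =====
def Claim_equal_filter_mmlu_pro : Prop := ∀ (dataset : List (List (String × String))) (num_problem_per_category : Int), Dom_filter_mmlu_pro dataset num_problem_per_category → Pre_filter_mmlu_pro dataset num_problem_per_category → Spec_filter_mmlu_pro dataset num_problem_per_category (filter_mmlu_pro dataset num_problem_per_category)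

-- ===== LEMMAS AND PROOFS =====

-- category of an example (only used under Pre_, where catOf? is some)
def catF (ex : List (String × String)) : String := (catOf? ex).getD ""

-- (category, index) pairs of the dataset
def pairsOf (ds : List (List (String × String))) : List (String × Int) :=
  (PySem.List.enumerate ds 0).map (fun p => (catF p.2, p.1))

-- indices of the examples of category c, in order
def idxsOf (ds : List (List (String × String))) (c : String) : List Int :=
  ((pairsOf ds).filter (fun q => q.1 == c)).map (·.2)

-- B's filtered part, named for the proofs
def bFiltered (ds : List (List (String × String))) (n : Int) : List (List (String × String)) :=
  ((PySem.List.enumerate ds 0).filter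
      (fun p => PySem.Set.contains (altKeep ds n) p.1)).map (·.2)

theorem alt_eq (ds : List (List (String × String))) (n : Int) :
    filter_mmlu_pro_alt ds n = (bFiltered ds n, (altGroups ds).keys) := rfl

theorem foldl_match_eq (l : List (Int × List (String × String)))
    (g : PySem.Dict String (List Int)) (h : ∀ p ∈ l, (catOf? p.2).isSome) :
    l.foldl
      (fun g p =>
        match catOf? p.2 with
        | none => g
        | some c => g.modify c ([] : List Int) (· ++ [p.1])) g
    = (l.map (fun p => (catF p.2, p.1))).foldl
        (fun d q => d.modify q.1 ([] : List Int) (· ++ [q.2])) g := by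
  induction l generalizing g with
  | nil => rfl
  | cons p l ih =>
    obtain ⟨c, hc⟩ := Option.isSome_iff_exists.mp (h p (by simp))
    simp only [List.foldl_cons, List.map_cons, hc, catF, Option.getD_some]
    exact ih _ (fun q hq => h q (by simp [hq]))

theorem pre_enum {ds : List (List (String × String))}
    (h : ∀ ex ∈ ds, (catOf? ex).isSome) :
    ∀ p ∈ PySem.List.enumerate ds (0 : Int), (catOf? p.2).isSome := by
  intro p hp
  obtain ⟨k, hk, rfl⟩ := (PySem.List.mem_enumerate_iff _ _ _).mp hp
  exact h _ (List.getElem_mem hk)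

theorem altGroups_eq (ds : List (List (String × String)))
    (h : ∀ ex ∈ ds, (catOf? ex).isSome) :
    altGroups ds
      = (pairsOf ds).foldl (fun d q => d.modify q.1 ([] : List Int) (· ++ [q.2]))
          PySem.Dict.empty := by
  unfold altGroups pairsOf
  exact foldl_match_eq _ _ (pre_enum h)

theorem map_fst_pairsOf (ds : List (List (String × String))) :
    (pairsOf ds).map (·.1) = ds.map catF := by
  unfold pairsOf
  rw [List.map_map]
  conv_rhs => rw [← PySem.List.map_snd_enumerate ds (0 : Int), List.map_map]
  rfl

theorem groups_keys (ds : List (List (String × String)))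
    (h : ∀ ex ∈ ds, (catOf? ex).isSome) :
    (altGroups ds).keys = PySem.Set.ofList (ds.map catF) := by
  rw [altGroups_eq ds h, PySem.Dict.keys_foldl_modify_key]
  rw [PySem.Dict.keys_empty, PySem.Set.update_nil_left, map_fst_pairsOf]

theorem groups_nodup (ds : List (List (String × String)))
    (h : ∀ ex ∈ ds, (catOf? ex).isSome) :
    (altGroups ds).keys.Nodup := by
  rw [groups_keys ds h]; exact PySem.Set.nodup_ofList _

theorem groups_getD (ds : List (List (String × String))) (c : String)
    (h : ∀ ex ∈ ds, (catOf? ex).isSome) :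
    (altGroups ds).getD c [] = idxsOf ds c := by
  rw [altGroups_eq ds h, PySem.Dict.getD_foldl_modify_append]
  simp [idxsOf]

theorem mem_idxs {ds : List (List (String × String))} {c : String} {j : Int}
    (hj : j ∈ idxsOf ds c) : 0 ≤ j ∧ j < (ds.length : Int) := by
  unfold idxsOf pairsOf at hj
  simp only [List.mem_map, List.mem_filter] at hj
  obtain ⟨q, ⟨⟨p, hp, rfl⟩, -⟩, rfl⟩ := hj
  obtain ⟨k, hk, rfl⟩ := (PySem.List.mem_enumerate_iff _ _ _).mp hp
  constructor <;> simp <;> omega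

theorem mem_idxs_c {ds : List (List (String × String))} {c : String} {j : Int}
    (hj : j ∈ idxsOf ds c) : c ∈ ds.map catF := by
  unfold idxsOf at hj
  simp only [List.mem_map, List.mem_filter] at hj
  obtain ⟨q, ⟨hq, hqc⟩, -⟩ := hj
  rw [← map_fst_pairsOf]
  exact List.mem_map.mpr ⟨q, hq, by simpa using hqc⟩

theorem keep_mem (ds : List (List (String × String))) (n : Int) (i : Int)
    (h : ∀ ex ∈ ds, (catOf? ex).isSome) :
    (altKeep ds n).contains i = true ↔
      ∃ c, i ∈ (idxsOf ds c).take (max n 0).toNat := by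
  have hsl : ∀ xs : List Int,
      PySem.List.slice xs none (some (max n 0)) = xs.take (max n 0).toNat :=
    fun xs => PySem.List.slice_to xs (le_max_right n 0)
  unfold altKeep
  rw [PySem.Set.contains_iff, PySem.Set.mem_ofList, List.mem_flatMap]
  rw [PySem.Dict.values_eq_map_keys _ (groups_nodup ds h) ([] : List Int)]
  constructor
  · rintro ⟨l, hl, hi⟩
    obtain ⟨c, hc, rfl⟩ := List.mem_map.mp hl
    rw [hsl, groups_getD ds c h] at hi
    exact ⟨c, hi⟩
  · rintro ⟨c, hi⟩
    have hmem : c ∈ (altGroups ds).keys := by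
      rw [groups_keys ds h, PySem.Set.mem_ofList]
      exact mem_idxs_c (List.mem_of_mem_take hi)
    refine ⟨(altGroups ds).getD c [], List.mem_map.mpr ⟨c, hmem, rfl⟩, ?_⟩
    rw [hsl, groups_getD ds c h]
    exact hi

theorem idxs_append (ds : List (List (String × String)))
    (ex : List (String × String)) (cx : String) (c : String)
    (hc : catOf? ex = some cx) :
    idxsOf (ds ++ [ex]) c
      = idxsOf ds c ++ (if cx == c then [(ds.length : Int)] else []) := by
  unfold idxsOf pairsOf
  rw [PySem.List.enumerate_append]
  by_cases hcc : cx = c <;>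
    simp [PySem.List.enumerate_cons, PySem.List.enumerate_nil, catF, hc, hcc]

theorem take_append_mem {j : Int} {l t : List Int} {m : Nat} {L : Int}
    (ht : ∀ x ∈ t, x = L) (hj : j ≠ L) :
    j ∈ (l ++ t).take m ↔ j ∈ l.take m := by
  rw [List.take_append]
  constructor
  · intro hmem
    rcases List.mem_append.mp hmem with h1 | h2
    · exact h1
    · exact absurd (ht _ (List.mem_of_mem_take h2)) hj
  · exact fun h1 => List.mem_append.mpr (Or.inl h1)

theorem bFiltered_append (ds : List (List (String × String)))
    (ex : List (String × String)) (cx : String) (n : Int)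
    (hpre : ∀ e ∈ ds ++ [ex], (catOf? e).isSome)
    (hc : catOf? ex = some cx) :
    bFiltered (ds ++ [ex]) n
      = bFiltered ds n
        ++ (if ((idxsOf ds cx).length : Int) < max n 0 then [ex] else []) := by
  have hds : ∀ e ∈ ds, (catOf? e).isSome := fun e he => hpre e (by simp [he])
  have hm : ∀ (j : Int), 0 ≤ j → j < (ds.length : Int) →
      ((altKeep (ds ++ [ex]) n).contains j = (altKeep ds n).contains j) := by
    intro j _ hjL
    have hjne : j ≠ (ds.length : Int) := by omega
    rw [Bool.eq_iff_iff, keep_mem _ n j hpre, keep_mem _ n j hds]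
    constructor
    · rintro ⟨c, hmem⟩
      rw [idxs_append ds ex cx c hc] at hmem
      refine ⟨c, (take_append_mem ?_ hjne).mp hmem⟩
      intro x hx; split at hx <;> simp_all
    · rintro ⟨c, hmem⟩
      refine ⟨c, ?_⟩
      rw [idxs_append ds ex cx c hc]
      exact (take_append_mem (by intro x hx; split at hx <;> simp_all) hjne).mpr hmem
  have hL : (altKeep (ds ++ [ex]) n).contains (ds.length : Int) = true ↔
      ((idxsOf ds cx).length : Int) < max n 0 := by
    rw [keep_mem _ n _ hpre]
    constructor
    · rintro ⟨c, hmem⟩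
      rw [idxs_append ds ex cx c hc, List.take_append] at hmem
      rcases List.mem_append.mp hmem with h1 | h2
      · have := mem_idxs (List.mem_of_mem_take h1); omega
      · by_cases hcc : cx = c
        · subst hcc
          rw [if_pos (by simp)] at h2
          by_cases hlen : (idxsOf ds cx).length < (max n 0).toNat
          · omega
          · rw [Nat.sub_eq_zero_of_le (Nat.le_of_not_lt hlen)] at h2
            simp at h2
        · rw [if_neg (by simpa using hcc)] at h2
          simp at h2
    · intro hlt
      refine ⟨cx, ?_⟩
      rw [idxs_append ds ex cx cx hc, if_pos (by simp), List.take_append]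
      refine List.mem_append.mpr (Or.inr ?_)
      rw [List.take_of_length_le (by simp; omega)]
      simp
  unfold bFiltered
  rw [PySem.List.enumerate_append]
  rw [List.filter_append, List.map_append]
  congr 1
  · apply congrArg
    apply List.filter_congr
    intro p hp
    obtain ⟨k, hk, rfl⟩ := (PySem.List.mem_enumerate_iff _ _ _).mp hp
    exact hm _ (by simp) (by simp; omega)
  · simp only [PySem.List.enumerate_cons, PySem.List.enumerate_nil, zero_add]
    rw [List.filter_singleton]
    by_cases hlt : ((idxsOf ds cx).length : Int) < max n 0
    · rw [if_pos hlt]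
      have hb : PySem.Set.contains (altKeep (ds ++ [ex]) n) ((ds.length : Int)) = true :=
        hL.mpr hlt
      simp only [hb, cond_true]
      rfl
    · rw [if_neg hlt]
      have hb : PySem.Set.contains (altKeep (ds ++ [ex]) n) ((ds.length : Int)) = false := by
        rw [Bool.eq_false_iff]; intro hx; exact hlt (hL.mp hx)
      simp only [hb, cond_false]
      rfl

theorem ofList_append_singleton {α : Type} [BEq α] (l : List α) (x : α) :
    PySem.Set.ofList (l ++ [x]) = PySem.Set.add (PySem.Set.ofList l) x := by
  rw [PySem.Set.ofList_eq_foldl, PySem.Set.ofList_eq_foldl, List.foldl_append]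
  rfl

theorem mmlu_arith (n : Int) (len : Nat) :
    min (max n 0) (len : Int) < n ↔ (len : Int) < max n 0 := by omega

theorem main_inv (n : Int) (ds : List (List (String × String)))
    (hpre : ∀ ex ∈ ds, (catOf? ex).isSome) :
    (ds.foldl (aStep n) ([], PySem.Dict.empty)).1 = bFiltered ds n ∧
    (ds.foldl (aStep n) ([], PySem.Dict.empty)).2.keys = (altGroups ds).keys ∧
    ∀ c, (ds.foldl (aStep n) ([], PySem.Dict.empty)).2.getD c 0
        = min (max n 0) ((idxsOf ds c).length : Int) := by
  induction ds using List.reverseRecOn with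
  | nil =>
    refine ⟨rfl, rfl, fun c => ?_⟩
    have h0 : idxsOf [] c = [] := rfl
    rw [h0]
    simp only [List.foldl_nil, PySem.Dict.getD_empty, List.length_nil, Nat.cast_zero]
    omega
  | append_singleton ds ex ih =>
    have hds : ∀ e ∈ ds, (catOf? e).isSome := fun e he => hpre e (by simp [he])
    obtain ⟨cx, hc⟩ := Option.isSome_iff_exists.mp (hpre ex (by simp))
    obtain ⟨ih1, ih2, ih3⟩ := ih hds
    set AS := ds.foldl (aStep n) ([], PySem.Dict.empty) with hAS
    have hstep : (ds ++ [ex]).foldl (aStep n) ([], PySem.Dict.empty) = aStep n AS ex := by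
      rw [List.foldl_append]; rfl
    -- the state of the counter dict for cx
    have hkeysS : AS.2.keys = PySem.Set.ofList (ds.map catF) := by
      rw [ih2, groups_keys ds hds]
    have hcontains : AS.2.contains cx = decide (cx ∈ ds.map catF) := by
      rw [PySem.Dict.contains_eq_decide_mem_keys, hkeysS]
      by_cases hmem : cx ∈ ds.map catF <;> simp [hmem, PySem.Set.mem_ofList]
    -- counts dict after the "ensure key" step
    set counts0 := if AS.2.contains cx then AS.2 else AS.2.insert cx 0 with hc0
    have hgetcx : counts0.getD cx 0 = min (max n 0) ((idxsOf ds cx).length : Int) := by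
      rw [hc0]
      split
      · exact ih3 cx
      · rename_i hnc
        rw [PySem.Dict.getD_insert_self]
        have h0 : AS.2.getD cx 0 = 0 :=
          PySem.Dict.getD_of_not_contains _ _ (by simpa using hnc)
        rw [ih3 cx] at h0
        omega
    have hgetne : ∀ c, c ≠ cx → counts0.getD c 0 = AS.2.getD c 0 := by
      intro c hne
      rw [hc0]
      split
      · rfl
      · exact PySem.Dict.getD_insert_of_ne _ _ _ hne
    have hkeys0 : counts0.keys
        = if cx ∈ ds.map catF then AS.2.keys else AS.2.keys ++ [cx] := by
      rw [hc0, hcontains]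
      by_cases hmem : cx ∈ ds.map catF
      · simp [hmem]
      · rw [if_neg (by simp [hmem]), if_neg hmem]
        exact PySem.Dict.keys_insert_of_not_contains _ _
            (by rw [hcontains]; simp [hmem])
    have hcont0 : counts0.contains cx = true := by
      rw [hc0]
      split
      · assumption
      · exact PySem.Dict.contains_insert_self _ _ _
    have hkeysB : (altGroups (ds ++ [ex])).keys
        = if cx ∈ ds.map catF then AS.2.keys else AS.2.keys ++ [cx] := by
      rw [groups_keys _ hpre]
      have : (ds ++ [ex]).map catF = ds.map catF ++ [cx] := by
        simp [catF, hc]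
      rw [this, ofList_append_singleton, hkeysS]
      by_cases hmem : cx ∈ ds.map catF
      · simp [hmem, PySem.Set.add, PySem.Set.mem_ofList]
      · simp [hmem, PySem.Set.add, PySem.Set.mem_ofList]
    have hlenx : (idxsOf (ds ++ [ex]) cx).length = (idxsOf ds cx).length + 1 := by
      rw [idxs_append ds ex cx cx hc, if_pos (by simp)]
      simp
    have hlenne : ∀ c, c ≠ cx → idxsOf (ds ++ [ex]) c = idxsOf ds c := by
      intro c hne
      rw [idxs_append ds ex cx c hc, if_neg (by simpa using (Ne.symm hne))]
      simp
    rw [hstep]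
    simp only [aStep, hc]
    rw [← hc0]
    by_cases hlt : counts0.getD cx 0 < n
    · rw [if_pos hlt]
      have hltn : ((idxsOf ds cx).length : Int) < max n 0 := by
        rw [hgetcx] at hlt
        exact (mmlu_arith n _).mp hlt
      refine ⟨?_, ?_, ?_⟩
      · rw [bFiltered_append ds ex cx n hpre hc, if_pos hltn, ih1]
      · rw [PySem.Dict.keys_insert_of_contains _ _ hcont0, hkeys0, hkeysB]
      · intro c
        by_cases hcc : c = cx
        · subst hcc
          rw [PySem.Dict.getD_insert_self, hgetcx, hlenx]
          push_cast
          omega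
        · rw [PySem.Dict.getD_insert_of_ne _ _ _ hcc, hgetne c hcc, ih3 c,
            hlenne c hcc]
    · rw [if_neg hlt]
      have hltn : ¬ ((idxsOf ds cx).length : Int) < max n 0 := by
        rw [hgetcx] at hlt
        exact fun hx => hlt ((mmlu_arith n _).mpr hx)
      refine ⟨?_, ?_, ?_⟩
      · rw [bFiltered_append ds ex cx n hpre hc, if_neg hltn, ih1, List.append_nil]
      · rw [hkeys0, hkeysB]
      · intro c
        by_cases hcc : c = cx
        · subst hcc
          rw [hgetcx, hlenx]
          push_cast
          omega
        · rw [hgetne c hcc, ih3 c, hlenne c hcc]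

theorem filter_mmlu_pro_main : ∀ (dataset : List (List (String × String))) (n : Int),
    Pre_filter_mmlu_pro dataset n →
    filter_mmlu_pro dataset n = filter_mmlu_pro_alt dataset n := by
  intro ds n hpre
  obtain ⟨h1, h2, -⟩ := main_inv n ds hpre
  rw [alt_eq]
  unfold filter_mmlu_pro
  exact Prod.ext h1 h2

-- ===== VERDICT (by name: the statement is the Claim_ definition above) =====
theorem filter_mmlu_pro_spec : Claim_equal_filter_mmlu_pro := by
  intro ds n _ hpre
  exact filter_mmlu_pro_main ds n hpre
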